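-- pv_equiv track=rewrite | github.com/KyungEunYou/mkm_model | mkm/utils.py | _rxn_eqn_slicer
-- ===== SOURCE A (Python) =====
-- def _rxn_eqn_slicer(reaction_eqn:str):
--     elem_list = reaction_eqn.split()
--     elem_list = [item for item in elem_list if item != '+']
--     arrow_pointer = 0
--     for elem in elem_list:
--         if elem == '->':
--             break
--         arrow_pointer += 1
--
--     return elem_list[:arrow_pointer], elem_list[arrow_pointer+1:]
-- ===== SOURCE B (Python) =====
-- def _rxn_eqn_slicer(reaction_eqn: str):
--     reactants, products = [], []
--     seen_arrow = False
--     for tok in reaction_eqn.split():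
--         if tok == '+':
--             continue
--         if tok == '->' and not seen_arrow:
--             seen_arrow = True
--         elif seen_arrow:
--             products.append(tok)
--         else:
--             reactants.append(tok)
--     return reactants, products
-- ===== Notes on version B (the rewrite author's own statement) =====
-- stated objective: simpler
-- what changed: Replaced A's three passes (filter out '+', scan for the first '->', then two slices) by a single scan with a seen-arrow flag that appends each token directly to reactants or products.
import Mathlib
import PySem

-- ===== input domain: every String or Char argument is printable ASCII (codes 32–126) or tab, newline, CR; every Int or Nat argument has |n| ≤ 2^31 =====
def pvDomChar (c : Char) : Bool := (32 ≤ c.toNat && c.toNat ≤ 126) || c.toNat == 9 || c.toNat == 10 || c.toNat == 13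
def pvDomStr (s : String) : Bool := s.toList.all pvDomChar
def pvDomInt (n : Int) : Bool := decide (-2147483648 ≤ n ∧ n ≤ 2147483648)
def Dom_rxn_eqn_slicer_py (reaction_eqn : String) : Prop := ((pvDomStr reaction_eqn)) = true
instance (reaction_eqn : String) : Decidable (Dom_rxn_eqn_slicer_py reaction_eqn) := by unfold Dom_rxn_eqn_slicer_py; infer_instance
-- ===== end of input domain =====

-- B replaces A's three passes (filter '+', scan for '->', two slices) by one accumulating
-- pass with a seen-arrow flag: same return value, a simpler single-scan decomposition.

-- ===== PORT A =====
-- A's for-loop with break: counts elements before the first '->' of the (filtered) list.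
def pvArrowPtr : List String → Nat
  | [] => 0
  | e :: rest => if e = "->" then 0 else pvArrowPtr rest + 1

def rxn_eqn_slicer_py (reaction_eqn : String) : List String × List String :=
  let elem_list := (PySem.Str.split₀ reaction_eqn).filter (fun item => item ≠ "+")
  let arrow_pointer := pvArrowPtr elem_list
  -- elem_list[:ap], elem_list[ap+1:] with 0 ≤ ap : take/drop are exactly Python's clamped slices
  (elem_list.take arrow_pointer, elem_list.drop (arrow_pointer + 1))

-- ===== PORT B =====
-- B's loop body on state (reactants, products, seen_arrow)
def pvStep (st : List String × List String × Bool) (tok : String) : List String × List String × Bool :=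
  if tok = "+" then st
  else if tok = "->" ∧ st.2.2 = false then (st.1, st.2.1, true)
  else if st.2.2 then (st.1, st.2.1 ++ [tok], st.2.2)
  else (st.1 ++ [tok], st.2.1, st.2.2)

def rxn_eqn_slicer_py_alt (reaction_eqn : String) : List String × List String :=
  let st := (PySem.Str.split₀ reaction_eqn).foldl pvStep ([], [], false)
  (st.1, st.2.1)

-- ===== PRECONDITION & SPEC =====
def Spec_rxn_eqn_slicer_py (reaction_eqn : String) (out : List String × List String) : Prop := out = rxn_eqn_slicer_py_alt reaction_eqn
instance (reaction_eqn : String) (out : List String × List String) : Decidable (Spec_rxn_eqn_slicer_py reaction_eqn out) := by unfold Spec_rxn_eqn_slicer_py; infer_instance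

-- ===== CLAIM (what is proved, stated in full; the proofs are below) =====
def Claim_equal_rxn_eqn_slicer_py : Prop := ∀ (reaction_eqn : String), Dom_rxn_eqn_slicer_py reaction_eqn → Spec_rxn_eqn_slicer_py reaction_eqn (rxn_eqn_slicer_py reaction_eqn)

-- ===== LEMMAS AND PROOFS =====

-- once the arrow has been seen, B appends every non-'+' token to products
theorem pvFold_seen (ts : List String) (r p : List String) :
    ts.foldl pvStep (r, p, true) = (r, p ++ ts.filter (fun t => t ≠ "+"), true) := by
  induction ts generalizing p with
  | nil => simp
  | cons t rest ih =>
    by_cases h : t = "+" <;>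
      simp [pvStep, h, ih]

-- before the arrow, B reproduces A's take/drop around the first '->' of the filtered rest
theorem pvFold_unseen (ts : List String) (r p : List String) :
    ts.foldl pvStep (r, p, false) =
      (r ++ (ts.filter (fun t => t ≠ "+")).take (pvArrowPtr (ts.filter (fun t => t ≠ "+"))),
       p ++ (ts.filter (fun t => t ≠ "+")).drop (pvArrowPtr (ts.filter (fun t => t ≠ "+")) + 1),
       decide ("->" ∈ ts)) := by
  induction ts generalizing r with
  | nil => simp
  | cons t rest ih =>
    by_cases h : t = "+"
    · simp [pvStep, h, ih]
    · by_cases ha : t = "->"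
      · simp [pvStep, ha, pvFold_seen, pvArrowPtr]
      · simp [pvStep, h, ha, pvArrowPtr, ih (r ++ [t])]
        exact fun hh => absurd hh.symm ha

-- ===== VERDICT (by name: the statement is the Claim_ definition above) =====
theorem rxn_eqn_slicer_py_spec : Claim_equal_rxn_eqn_slicer_py := by
  intro s _
  unfold Spec_rxn_eqn_slicer_py rxn_eqn_slicer_py rxn_eqn_slicer_py_alt
  simp [pvFold_unseen]
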